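-- pv_equiv track=rewrite | github.com/cristianlagranda/Bank_Defaulter_Customer | functions.py | calculate_personal_loan_defaulter
-- ===== SOURCE A (Python) =====
-- def calculate_personal_loan_defaulter(input):       #input key -> CT68554,Ronald Chiki   value --> [01,05,06,07,08,09,10,11,12]
--
--     #bank conditions
--     max_allowed_missed_months = 4
--     max_allowed_consecutive_missing = 2
--
--     name, months_list = input                                   #input key -> CT68554,Ronald Chiki   value --> [01,05,06,07,08,09,10,11,12]
--
--     months_list.sort()
--     sorted_months = months_list                                 # sorted_months = [01,05,06,07,08,09,10,11,12]
--     total_payments = len(sorted_months)                         # total_payments = 9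
--
--     missed_payments = 12 - total_payments                       # missed_payments = 3
--
--     #FIRST CONDITION: TOTAL MISSED PAYMENTS = 4
--     if missed_payments > max_allowed_missed_months:             # false
--        return name, missed_payments                             #  N/A
--
--
--     #SECOND CONDITION: NO MORE THAN 2 CONSECUTIVE MISSED PAYMENTS
--     consecutive_missed_months = 0
--
--     #WE FIRST CHECK IF THEY MISS THE FIRST 4 MONTHS
--     temp = sorted_months[0] - 1                                 # temp = 1 - 1 = 0
--     if temp > consecutive_missed_months:                        # 0 > 4 -> FALSE
--         consecutive_missed_months = temp                        # 0
--
--     #WE DO THE SAME FOR THE LAST 4 MONTHS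
--     temp = 12 - sorted_months[-1]                               #temp = 12 - 12 = 0
--     if temp > consecutive_missed_months:                        # 0 > 4 -> FALSE
--         consecutive_missed_months = temp                        # temp = 0
--
--     #AFTER CHECKING THE EXTREMES, WE NOW FOCUS ON THE INSIDE
--     for i in range(1, len(sorted_months)):                      # [01,05,06,07,08,09,10,11,12]
--         temp = sorted_months[i] - sorted_months[i-1] -1         # temp = 5-1-1 = 3
--         if temp > consecutive_missed_months:
--             consecutive_missed_months = temp                    # consecutive_missed_months = 3
--
--     if consecutive_missed_months > max_allowed_consecutive_missing:
--        return name, consecutive_missed_months                   # CT68554,Ronald Chiki   3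
--
--     return name, 0 #if they didnt miss any payment, we return 0
-- ===== SOURCE B (Python) =====
-- def calculate_personal_loan_defaulter(input):
--     name, months_list = input
--     months_list.sort()   # kept for A's in-place sort side effect
--     missed_payments = 12 - len(months_list)
--     if missed_payments > 4:
--         return name, missed_payments
--     run = best = 0
--     for month in range(1, 13):
--         if month in months_list:
--             run = 0
--         else:
--             run += 1
--             if run > best:
--                 best = run
--     return (name, best) if best > 2 else (name, 0)
-- ===== Notes on version B (the rewrite author's own statement) =====
-- stated objective: simpler
-- what changed: Replaces A's three-part gap analysis on the sorted list (leading gap, trailing gap, and an indexed fold over adjacent differences) by a single run-length scan over the twelve calendar months testing membership; the sort is kept only for A's in-place mutation side effect.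
-- outside the precondition, e.g. on calculate_personal_loan_defaulter(('X', [-5, 2, 3, 4, 5, 6, 7, 8, 9, 10, 11, 12])): A returns ('X', 6), B returns ('X', 0)
import Mathlib
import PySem

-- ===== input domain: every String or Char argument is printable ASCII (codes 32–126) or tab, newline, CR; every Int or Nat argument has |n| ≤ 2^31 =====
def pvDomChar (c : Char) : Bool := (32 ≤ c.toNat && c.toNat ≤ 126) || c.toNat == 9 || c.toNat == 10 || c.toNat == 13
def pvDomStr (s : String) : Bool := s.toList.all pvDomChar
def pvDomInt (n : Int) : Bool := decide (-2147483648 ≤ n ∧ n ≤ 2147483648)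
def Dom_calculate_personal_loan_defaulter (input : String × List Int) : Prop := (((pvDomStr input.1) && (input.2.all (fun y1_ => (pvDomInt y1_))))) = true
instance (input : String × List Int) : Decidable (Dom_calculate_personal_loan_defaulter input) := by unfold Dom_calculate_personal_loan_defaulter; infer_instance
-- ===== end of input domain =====

-- B replaces A's three-part gap analysis on the sorted list by a single run-length scan over
-- the twelve calendar months testing membership (simpler); B keeps A's in-place sort of the list.


-- ===== PORT A =====
def calculate_personal_loan_defaulter (input : String × List Int) : String × Int :=
  let name := input.1
  let sorted_months := PySem.List.sorted input.2 (fun x => x) false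
  let total_payments : Int := sorted_months.length
  let missed_payments : Int := 12 - total_payments
  if missed_payments > 4 then (name, missed_payments)
  else
    let consecutive_missed_months : Int := 0
    -- sorted_months[0] / sorted_months[-1]: in range whenever this branch runs (length ≥ 8),
    -- so pyGet? is always some here and the .getD 0 default is dead
    let temp0 := (PySem.List.pyGet? sorted_months 0).getD 0 - 1
    let c1 := if temp0 > consecutive_missed_months then temp0 else consecutive_missed_months
    let temp1 := 12 - (PySem.List.pyGet? sorted_months (-1)).getD 0
    let c2 := if temp1 > c1 then temp1 else c1
    let c3 := (PySem.List.pyRange 1 total_payments 1).foldl (fun c i =>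
      let temp := (PySem.List.pyGet? sorted_months i).getD 0 -
                  (PySem.List.pyGet? sorted_months (i - 1)).getD 0 - 1
      if temp > c then temp else c) c2
    if c3 > 2 then (name, c3) else (name, 0)

-- ===== PORT B =====
def calculate_personal_loan_defaulter_alt (input : String × List Int) : String × Int :=
  let name := input.1
  let months := PySem.List.sorted input.2 (fun x => x) false   -- kept for A's in-place sort side effect
  let missed : Int := 12 - (months.length : Int)
  if missed > 4 then (name, missed)
  else
    let rb := (PySem.List.pyRange 1 13 1).foldl (fun (p : Int × Int) month =>
      if month ∈ months then (0, p.2)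
      else (p.1 + 1, if p.1 + 1 > p.2 then p.1 + 1 else p.2)) ((0 : Int), (0 : Int))
    if rb.2 > 2 then (name, rb.2) else (name, 0)

-- ===== PRECONDITION & SPEC =====
-- Pre_ excludes only lists of 8 or more payments containing an entry outside 1..12: month
-- numbers outside 1..12 are not calendar months, and A's gap arithmetic on them is an accident
-- of the implementation (see claim cites); every shorter list and every in-range list is admitted.
def Pre_calculate_personal_loan_defaulter (input : String × List Int) : Prop :=
  input.2.length ≤ 7 ∨ ∀ m ∈ input.2, 1 ≤ m ∧ m ≤ 12
instance (input : String × List Int) : Decidable (Pre_calculate_personal_loan_defaulter input) := by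
  unfold Pre_calculate_personal_loan_defaulter; infer_instance

def pvWitness_calculate_personal_loan_defaulter : (String × List Int) :=
  ("CT68554", [1, 5, 6, 7, 8, 9, 10, 11, 12])

def Spec_calculate_personal_loan_defaulter (input : String × List Int) (out : String × Int) : Prop := out = calculate_personal_loan_defaulter_alt input
instance (input : String × List Int) (out : String × Int) : Decidable (Spec_calculate_personal_loan_defaulter input out) := by unfold Spec_calculate_personal_loan_defaulter; infer_instance

-- ===== CLAIM (what is proved, stated in full; the proofs are below) =====
def Claim_equal_calculate_personal_loan_defaulter : Prop := ∀ (input : String × List Int), Dom_calculate_personal_loan_defaulter input → Pre_calculate_personal_loan_defaulter input → Spec_calculate_personal_loan_defaulter input (calculate_personal_loan_defaulter input)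

-- ===== LEMMAS AND PROOFS =====

-- A's gap fold, as structural recursion over adjacent pairs
def gapsAcc : List Int → Int → Int
  | x :: y :: t, c => gapsAcc (y :: t) (if y - x - 1 > c then y - x - 1 else c)
  | _, c => c

-- last element with junk default
def lastD : List Int → Int
  | [] => 0
  | [x] => x
  | _ :: y :: t => lastD (y :: t)

-- the common value: longest run of months of [a..b] missing from the sorted list
def G (a b : Int) : List Int → Int
  | [] => 0
  | [x] => max 0 (max (x - a) (b - x))
  | x :: y :: t => max (max 0 (x - a)) (G (x + 1) b (y :: t))

-- B's loop body
def bstep (s : List Int) (p : Int × Int) (m : Int) : Int × Int :=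
  if m ∈ s then (0, p.2) else (p.1 + 1, if p.1 + 1 > p.2 then p.1 + 1 else p.2)


lemma getLast?_getD_eq_lastD (s : List Int) : s.getLast?.getD 0 = lastD s := by
  match s with
  | [] => rfl
  | [x] => rfl
  | x :: y :: t =>
    have := getLast?_getD_eq_lastD (y :: t)
    simpa [List.getLast?_cons_cons, lastD] using this

lemma G_cons_cons (a b x y : Int) (t : List Int) :
    G a b (x :: y :: t) = max (max 0 (x - a)) (G (x + 1) b (y :: t)) := rfl


-- A's indexed fold over range(1, len) equals the structural recursion gapsAcc
lemma idx_aux (t : List Int) : ∀ (pre s : List Int) (x c lo hi : Int),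
    s = pre ++ x :: t → lo = (pre.length : Int) + 1 → hi = lo + (t.length : Int) →
    (PySem.List.pyRange lo hi 1).foldl (fun c i =>
      if (PySem.List.pyGet? s i).getD 0 - (PySem.List.pyGet? s (i - 1)).getD 0 - 1 > c
      then (PySem.List.pyGet? s i).getD 0 - (PySem.List.pyGet? s (i - 1)).getD 0 - 1
      else c) c = gapsAcc (x :: t) c := by
  induction t with
  | nil =>
    intro pre s x c lo hi hs hlo hhi
    rw [PySem.List.pyRange_one_eq_nil (by simp at hhi; omega)]
    rfl
  | cons y t' ih =>
    intro pre s x c lo hi hs hlo hhi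
    rw [PySem.List.pyRange_one_cons (by simp at hhi; omega : lo < hi), List.foldl_cons]
    have hgy : PySem.List.pyGet? s lo = some y := by
      rw [hs, show pre ++ x :: y :: t' = (pre ++ [x]) ++ y :: t' by simp,
        show lo = (((pre ++ [x]).length : Nat) : Int) by simp; omega]
      exact PySem.List.pyGet?_append_length _ _ _
    have hgx : PySem.List.pyGet? s (lo - 1) = some x := by
      rw [hs, show lo - 1 = ((pre.length : Nat) : Int) by omega]
      exact PySem.List.pyGet?_append_length _ _ _
    rw [show (if (PySem.List.pyGet? s lo).getD 0 - (PySem.List.pyGet? s (lo - 1)).getD 0 - 1 > c then (PySem.List.pyGet? s lo).getD 0 - (PySem.List.pyGet? s (lo - 1)).getD 0 - 1 else c) = (if y - x - 1 > c then y - x - 1 else c) by simp [hgy, hgx]]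
    have := ih (pre ++ [x]) s y (if y - x - 1 > c then y - x - 1 else c) (lo + 1) hi
      (by simp [hs]) (by simp; omega) (by simp at hhi ⊢; omega)
    rw [this]
    rfl

lemma gapsAcc_eq_G (t : List Int) : ∀ (x a b c : Int), 0 ≤ c →
    gapsAcc (x :: t) (max (max c (x - a)) (b - lastD (x :: t))) = max c (G a b (x :: t)) := by
  induction t with
  | nil =>
    intro x a b c hc
    show max (max c (x - a)) (b - lastD [x]) = max c (G a b [x])
    simp only [lastD, G]
    omega
  | cons y t' ih =>
    intro x a b c hc
    show gapsAcc (y :: t') (if y - x - 1 > max (max c (x - a)) (b - lastD (x :: y :: t')) then y - x - 1 else max (max c (x - a)) (b - lastD (x :: y :: t'))) = max c (G a b (x :: y :: t'))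
    have hl : lastD (x :: y :: t') = lastD (y :: t') := rfl
    rw [hl]
    have harr : (if y - x - 1 > max (max c (x - a)) (b - lastD (y :: t')) then y - x - 1 else max (max c (x - a)) (b - lastD (y :: t')))
        = max (max (max c (x - a)) (y - (x + 1))) (b - lastD (y :: t')) := by
      split_ifs with h <;> omega
    rw [harr, ih y (x+1) b (max c (x - a)) (by omega)]
    show max (max c (x - a)) (G (x+1) b (y :: t')) = max c (max (max 0 (x - a)) (G (x + 1) b (y :: t')))
    omega

-- a run of k consecutive non-members
lemma bstep_run (s : List Int) : ∀ (k : Nat) (a r b0 : Int), r ≤ b0 →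
    (∀ m : Int, a ≤ m → m < a + (k : Int) → m ∉ s) →
    (PySem.List.pyRange a (a + (k : Int)) 1).foldl (bstep s) (r, b0) = (r + k, max b0 (r + k)) := by
  intro k
  induction k with
  | zero =>
    intro a r b0 hr _
    rw [show a + ((0:Nat) : Int) = a by omega, PySem.List.pyRange_one_eq_nil (le_refl a)]
    simp; omega
  | succ k ih =>
    intro a r b0 hr hnm
    rw [PySem.List.pyRange_one_cons (by omega : a < a + ((k+1 : Nat) : Int))]
    rw [List.foldl_cons]
    have hna : a ∉ s := hnm a (le_refl a) (by push_cast; omega)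
    have hb : bstep s (r, b0) a = (r + 1, max b0 (r + 1)) := by
      simp [bstep, hna]; omega
    rw [hb]
    have := ih (a+1) (r+1) (max b0 (r+1)) (by omega)
      (by intro m h1 h2; exact hnm m (by omega) (by push_cast at h2 ⊢; omega))
    rw [show a + ((k+1 : Nat) : Int) = (a + 1) + (k : Int) by push_cast; omega, this]
    have : r + 1 + (k:Int) = r + ((k+1 : Nat) : Int) := by push_cast; omega
    rw [this]
    congr 1
    omega

lemma bstep_run' (s : List Int) (a x r b0 : Int) (h : a ≤ x) (hr : r ≤ b0)
    (hnm : ∀ m : Int, a ≤ m → m < x → m ∉ s) :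
    (PySem.List.pyRange a x 1).foldl (bstep s) (r, b0) = (r + (x - a), max b0 (r + (x - a))) := by
  obtain ⟨k, hk⟩ : ∃ k : Nat, x = a + (k : Int) := ⟨(x - a).toNat, by omega⟩
  subst hk
  have := bstep_run s k a r b0 hr (by intro m h1 h2; exact hnm m h1 h2)
  rw [this]
  have h1 : a + (k : Int) - a = (k : Int) := by omega
  rw [h1]

-- B's scan over [a..b] computes max b0 (G a b s) for a sorted non-empty s with elements in [a-1, b]
lemma scan_eq (s : List Int) : ∀ (a b b0 : Int), s ≠ [] → s.Pairwise (· ≤ ·) →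
    (∀ m ∈ s, a - 1 ≤ m ∧ m ≤ b) → a ≤ b + 1 → 0 ≤ b0 →
    ((PySem.List.pyRange a (b + 1) 1).foldl (bstep s) (0, b0)).2 = max b0 (G a b s) := by
  induction s with
  | nil => intro a b b0 hne; exact absurd rfl hne
  | cons x t ih =>
    intro a b b0 _ hsort hmem hab hb0
    have hx : ∀ m ∈ t, x ≤ m := (List.pairwise_cons.mp hsort).1
    have hxt := (List.pairwise_cons.mp hsort).2
    have hxa : a - 1 ≤ x := (hmem x (by simp)).1
    have hxb : x ≤ b := (hmem x (by simp)).2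
    by_cases hax : a ≤ x
    · rw [PySem.List.pyRange_one_append a x (b+1) hax (by omega),
          PySem.List.pyRange_one_cons (by omega : x < b + 1), List.foldl_append,
          bstep_run' (x::t) a x 0 b0 hax hb0
            (by intro m h1 h2 hm
                rcases List.mem_cons.mp hm with h | h
                · omega
                · have := hx m h; omega),
          List.foldl_cons]
      have hstep : bstep (x::t) (0 + (x - a), max b0 (0 + (x - a))) x = (0, max b0 (x - a)) := by
        simp [bstep]
      rw [hstep]
      cases t with
      | nil =>
        rw [bstep_run' [x] (x+1) (b+1) 0 (max b0 (x - a)) (by omega) (by omega)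
          (by intro m h1 h2; simp; omega)]
        simp only [G]
        omega
      | cons y t' =>
        rw [PySem.List.foldl_congr_mem _ (bstep (x::y::t')) (bstep (y::t')) _
          (by intro acc m hm
              have hge : x + 1 ≤ m := (PySem.List.mem_pyRange_one.mp hm).1
              have hmx : m ≠ x := by omega
              simp [bstep, List.mem_cons, hmx])]
        rw [ih (x+1) b (max b0 (x - a)) (by simp) hxt
            (by intro m hm; refine ⟨?_, (hmem m (by simp [hm])).2⟩; have := hx m hm; omega)
            (by omega) (by omega)]
        rw [G_cons_cons]
        omega
    · have hxe : x = a - 1 := by omega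
      cases t with
      | nil =>
        rw [bstep_run' [x] a (b+1) 0 b0 (by omega) hb0 (by intro m h1 h2; simp; omega)]
        simp only [G]
        omega
      | cons y t' =>
        rw [PySem.List.foldl_congr_mem _ (bstep (x::y::t')) (bstep (y::t')) _
          (by intro acc m hm
              have hge : a ≤ m := (PySem.List.mem_pyRange_one.mp hm).1
              have hmx : m ≠ x := by omega
              simp [bstep, List.mem_cons, hmx])]
        rw [ih a b b0 (by simp) hxt
            (by intro m hm; refine ⟨?_, (hmem m (by simp [hm])).2⟩; have := hx m hm; omega)
            hab hb0]
        rw [G_cons_cons, show x + 1 = a by omega]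
        omega

-- ===== VERDICT (by name: the statement is the Claim_ definition above) =====
theorem calculate_personal_loan_defaulter_spec : Claim_equal_calculate_personal_loan_defaulter := by
  intro input hdom hpre
  unfold Spec_calculate_personal_loan_defaulter
  obtain ⟨name, l⟩ := input
  simp only [calculate_personal_loan_defaulter, calculate_personal_loan_defaulter_alt]
  set s := PySem.List.sorted l (fun x => x) false with hs
  by_cases hbr : (12 : Int) - (s.length : Int) > 4
  · rw [if_pos hbr, if_pos hbr]
  · rw [if_neg hbr, if_neg hbr]
    have hlen : 8 ≤ s.length := by omega
    have hlenl : ¬ l.length ≤ 7 := by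
      have hls := PySem.List.length_sorted l (fun x => x) false
      rw [← hs] at hls
      omega
    have hmem : ∀ m ∈ s, 1 ≤ m ∧ m ≤ 12 := by
      intro m hm
      exact (hpre.resolve_left hlenl) m ((PySem.List.sorted_perm l (fun x => x) false).mem_iff.mp hm)
    have hsort : s.Pairwise (· ≤ ·) := by
      simpa using PySem.List.sorted_pairwise (xs := l) (key := fun x => x)
    obtain ⟨x, t, hst⟩ : ∃ x t, s = x :: t := by
      cases hc : s with
      | nil => rw [hc] at hlen; simp at hlen
      | cons a b => exact ⟨a, b, rfl⟩
    rw [hst] at hmem hsort ⊢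
    -- A side: head, last, the two if-updates, the indexed gap fold
    rw [PySem.List.pyGet?_zero_cons, PySem.List.pyGet?_neg_one]
    simp only [Option.getD_some, getLast?_getD_eq_lastD]
    rw [show (((x :: t).length : Nat) : Int) = 1 + (t.length : Int) by simp; omega]
    rw [idx_aux t [] (x :: t) x _ 1 (1 + (t.length : Int)) rfl (by simp) (by simp)]
    rw [show (if 12 - lastD (x :: t) > if x - 1 > 0 then x - 1 else 0 then
                12 - lastD (x :: t) else if x - 1 > 0 then x - 1 else 0)
          = max (max 0 (x - 1)) (12 - lastD (x :: t)) by split_ifs <;> omega]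
    rw [gapsAcc_eq_G t x 1 12 0 (le_refl 0)]
    -- B side: the membership scan
    rw [show (fun (p : Int × Int) month =>
          if month ∈ x :: t then ((0 : Int), p.2)
          else (p.1 + 1, if p.1 + 1 > p.2 then p.1 + 1 else p.2)) = bstep (x :: t) from rfl]
    rw [show (13 : Int) = 12 + 1 by norm_num]
    rw [scan_eq (x :: t) 1 12 0 (by simp) hsort
        (by intro m hm; have := hmem m hm; omega) (by norm_num) (le_refl 0)]
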